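-- pv_equiv track=rewrite | github.com/FixTeen-36/Nonograms_Katana_Solver | src/solver.py | solve_row
-- ===== SOURCE A (Python) =====
-- def solve_row(row: list, options: list) -> set:
--     points = set()
--     crosses = set()
--     for i, value in enumerate(row):
--         if value == 1:
--             points.add(i)
--         if value == 2:
--             crosses.add(i)
--
--     to_pop = []
--     intersection = set(range(len(row))) - points
--     substraction = set(range(len(row))) - crosses
--     for i, option in enumerate(options):
--         coordinates = set(option)
--         if (coordinates & crosses) or not(points <= coordinates):
--             to_pop.append(i)
--         else:
--             intersection = intersection & coordinates
--             substraction = substraction - coordinates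
--
--     for i in reversed(to_pop):
--         options.pop(i)
--     for i in intersection:
--         row[i] = 1
--     for i in substraction:
--         row[i] = 2
--
--     return intersection | substraction
-- ===== SOURCE B (Python) =====
-- def solve_row(row: list, options: list) -> set:
--     n = len(row)
--     pts = [i for i, v in enumerate(row) if v == 1]
--     cnt = {}
--     kept = []
--     for opt in options:
--         d = dict.fromkeys(opt)
--         if any(0 <= c < n and row[c] == 2 for c in d):
--             continue
--         if any(p not in d for p in pts):
--             continue
--         kept.append(opt)
--         for c in d:
--             cnt[c] = cnt.get(c, 0) + 1
--     options[:] = kept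
--     m = len(kept)
--     filled = [i for i in range(n) if row[i] != 1 and cnt.get(i, 0) == m]
--     empty = [i for i in range(n) if row[i] != 2 and cnt.get(i, 0) == 0]
--     for i in filled:
--         row[i] = 1
--     for i in empty:
--         row[i] = 2
--     return set(filled) | set(empty)
-- ===== Notes on version B (the rewrite author's own statement) =====
-- stated objective: alternative
-- what changed: B drops A's set algebra entirely: each option is tested directly against the row (a guarded row[c]==2 lookup per coordinate and a point-list membership test in the option's dict.fromkeys index), a per-cell coverage counter over the kept options replaces A's running intersection/difference sets, and forced cells come from the count test cnt==m (filled) / cnt==0 (empty); the to_pop/reversed-pop bookkeeping is gone.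
import Mathlib
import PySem

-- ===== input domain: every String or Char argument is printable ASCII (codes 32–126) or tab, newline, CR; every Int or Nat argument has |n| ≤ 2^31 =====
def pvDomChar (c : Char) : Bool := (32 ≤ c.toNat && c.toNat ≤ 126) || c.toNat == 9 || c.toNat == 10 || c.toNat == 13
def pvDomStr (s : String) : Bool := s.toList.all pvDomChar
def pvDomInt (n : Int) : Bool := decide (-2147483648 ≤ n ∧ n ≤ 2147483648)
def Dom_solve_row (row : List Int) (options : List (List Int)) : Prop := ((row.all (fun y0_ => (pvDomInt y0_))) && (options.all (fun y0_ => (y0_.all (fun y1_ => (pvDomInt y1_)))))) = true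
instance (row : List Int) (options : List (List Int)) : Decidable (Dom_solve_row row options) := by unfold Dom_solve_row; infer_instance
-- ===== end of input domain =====

-- B replaces A's index-set algebra (points/crosses sets, running intersection/difference,
-- to_pop + reversed pops) by direct row lookups for the option test and a per-cell coverage
-- counter over the kept options (alternative decomposition). Both Pythons mutate row/options
-- in place identically; the equivalence proved here is about the RETURN value.

-- ===== PORT A =====
def solve_row (row : List Int) (options : List (List Int)) : List Int :=
  -- points/crosses loop over enumerate(row)
  let pc := (PySem.List.enumerate row 0).foldl
    (fun (s : PySem.Set Int × PySem.Set Int) iv =>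
      let s1 := if iv.2 == 1 then (PySem.Set.add s.1 iv.1, s.2) else s
      if iv.2 == 2 then (s1.1, PySem.Set.add s1.2 iv.1) else s1)
    (PySem.Set.empty, PySem.Set.empty)
  let points := pc.1
  let crosses := pc.2
  -- to_pop / intersection / substraction loop over enumerate(options); the reversed pops and
  -- the row[i] = 1 / row[i] = 2 writes only mutate the arguments, not the returned set
  let st := (PySem.List.enumerate options 0).foldl
    (fun (s : List Int × PySem.Set Int × PySem.Set Int) io =>
      let coordinates := PySem.Set.ofList io.2
      if !(PySem.Set.inter coordinates crosses).isEmpty || !(PySem.Set.issubset points coordinates) then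
        (s.1 ++ [io.1], s.2.1, s.2.2)
      else
        (s.1, PySem.Set.inter s.2.1 coordinates, PySem.Set.diff s.2.2 coordinates))
    ([],
     PySem.Set.diff (PySem.Set.ofList (PySem.List.pyRange 0 (row.length : Int) 1)) points,
     PySem.Set.diff (PySem.Set.ofList (PySem.List.pyRange 0 (row.length : Int) 1)) crosses)
  PySem.Set.union st.2.1 st.2.2

-- ===== PORT B =====
-- B-side helpers: the two skip tests of B's option loop, both over d = dict.fromkeys(opt)
-- (= PySem.List.dedup opt): a cross hit (`0 <= c < n and row[c] == 2`; row[c] under the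
-- guard is exact as pyGetD) and a missed point (`p not in d`), and the counter bump over d
def pvB_cross (row : List Int) (opt : List Int) : Bool :=
  (PySem.List.dedup opt).any
    (fun c => decide (0 ≤ c) && decide (c < (row.length : Int)) && (PySem.List.pyGetD row c 0 == 2))

def pvB_miss (pts : List Int) (opt : List Int) : Bool :=
  pts.any (fun p => !((PySem.List.dedup opt).contains p))

def pvB_bump (d : PySem.Dict Int Int) (opt : List Int) : PySem.Dict Int Int :=
  (PySem.List.dedup opt).foldl (fun d c => d.modify c 0 (· + 1)) d

def solve_row_alt (row : List Int) (options : List (List Int)) : List Int :=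
  -- pts = [i for i, v in enumerate(row) if v == 1]
  let pts := (PySem.List.enumerate row 0).filterMap (fun iv => if iv.2 == 1 then some iv.1 else none)
  -- one loop over the options: skip on a cross hit or a missed point, else keep the option
  -- and bump the coverage counter once per distinct coordinate
  let km := options.foldl
    (fun (s : List (List Int) × PySem.Dict Int Int) opt =>
      if pvB_cross row opt then s
      else if pvB_miss pts opt then s
      else (s.1 ++ [opt], pvB_bump s.2 opt))
    ([], PySem.Dict.empty)
  let kept := km.1
  let cnt := km.2
  let m : Int := (kept.length : Int)
  -- options[:] = kept and the row writes mutate the arguments only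
  let filled := (PySem.List.pyRange 0 (row.length : Int) 1).filter
    (fun i => (!(PySem.List.pyGetD row i 0 == 1)) && (cnt.getD i 0 == m))
  let empty := (PySem.List.pyRange 0 (row.length : Int) 1).filter
    (fun i => (!(PySem.List.pyGetD row i 0 == 2)) && (cnt.getD i 0 == 0))
  PySem.Set.union (PySem.Set.ofList filled) (PySem.Set.ofList empty)

-- ===== PRECONDITION & SPEC =====
def Spec_solve_row (row : List Int) (options : List (List Int)) (out : List Int) : Prop := out = solve_row_alt row options
instance (row : List Int) (options : List (List Int)) (out : List Int) : Decidable (Spec_solve_row row options out) := by unfold Spec_solve_row; infer_instance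

-- ===== CLAIM (what is proved, stated in full; the proofs are below) =====
def Claim_equal_solve_row : Prop := ∀ (row : List Int) (options : List (List Int)), Dom_solve_row row options → Spec_solve_row row options (solve_row row options)

-- ===== LEMMAS AND PROOFS =====

-- A's single enumerate(row) loop builds exactly the two sets of indices of value 1 / value 2
theorem pv_points_crosses (l : List (Int × Int)) (s : PySem.Set Int × PySem.Set Int) :
    l.foldl
      (fun (s : PySem.Set Int × PySem.Set Int) iv =>
        let s1 := if iv.2 == 1 then (PySem.Set.add s.1 iv.1, s.2) else s
        if iv.2 == 2 then (s1.1, PySem.Set.add s1.2 iv.1) else s1)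
      s
    = (PySem.Set.update s.1 (l.filterMap (fun iv => if iv.2 == 1 then some iv.1 else none)),
       PySem.Set.update s.2 (l.filterMap (fun iv => if iv.2 == 2 then some iv.1 else none))) := by
  induction l generalizing s with
  | nil => simp [PySem.Set.update]
  | cons hd tl ih =>
    rw [List.foldl_cons, ih]
    by_cases h1 : hd.2 = 1 <;> by_cases h2 : hd.2 = 2 <;>
      simp [h1, h2, PySem.Set.update_cons]

-- membership in the index list { i | row[i] == t } built by A
theorem pv_mem_idx (row : List Int) (t x : Int) :
    x ∈ (PySem.List.enumerate row 0).filterMap (fun iv => if iv.2 == t then some iv.1 else none)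
      ↔ 0 ≤ x ∧ x < (row.length : Int) ∧ PySem.List.pyGetD row x 0 = t := by
  simp only [List.mem_filterMap, PySem.List.mem_enumerate_iff]
  constructor
  · rintro ⟨⟨i, v⟩, ⟨k, hk, hp⟩, hif⟩
    cases hp
    split at hif
    · rename_i hv
      cases hif
      refine ⟨by omega, by omega, ?_⟩
      rw [PySem.List.pyGetD_of_nonneg row 0 (by omega)]
      have hk' : ((0 : Int) + (k : Int)).toNat = k := by omega
      rw [hk', List.getD_eq_getElem _ _ hk]
      exact beq_iff_eq.mp hv
    · cases hif
  · rintro ⟨h0, hn, hv⟩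
    refine ⟨(x, t), ⟨x.toNat, by omega, ?_⟩, by simp⟩
    rw [PySem.List.pyGetD_of_nonneg row 0 h0] at hv
    rw [List.getD_eq_getElem _ _ (by omega)] at hv
    simp [hv, h0]

-- A's filtered accumulation loop is a filter followed by two independent reductions
theorem pv_options_fold (crosses points : PySem.Set Int)
    (l : List (Int × List Int)) (s : List Int × PySem.Set Int × PySem.Set Int) :
    (l.foldl
      (fun (s : List Int × PySem.Set Int × PySem.Set Int) io =>
        let coordinates := PySem.Set.ofList io.2
        if !(PySem.Set.inter coordinates crosses).isEmpty || !(PySem.Set.issubset points coordinates) then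
          (s.1 ++ [io.1], s.2.1, s.2.2)
        else
          (s.1, PySem.Set.inter s.2.1 coordinates, PySem.Set.diff s.2.2 coordinates))
      s).2
    = (((l.map Prod.snd).filter (fun opt =>
          (PySem.Set.inter (PySem.Set.ofList opt) crosses).isEmpty &&
            PySem.Set.issubset points (PySem.Set.ofList opt))).foldl
          (fun t opt => PySem.Set.inter t (PySem.Set.ofList opt)) s.2.1,
       ((l.map Prod.snd).filter (fun opt =>
          (PySem.Set.inter (PySem.Set.ofList opt) crosses).isEmpty &&
            PySem.Set.issubset points (PySem.Set.ofList opt))).foldl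
          (fun t opt => PySem.Set.diff t (PySem.Set.ofList opt)) s.2.2) := by
  induction l generalizing s with
  | nil => rfl
  | cons hd tl ih =>
    rw [List.foldl_cons, ih]
    by_cases hA : (PySem.Set.inter (PySem.Set.ofList hd.2) crosses).isEmpty = true <;>
      by_cases hB : PySem.Set.issubset points (PySem.Set.ofList hd.2) = true <;>
        simp [hA, hB]

-- set intersection / difference are filters (definitional)
theorem pv_inter_eq_filter (s t : PySem.Set Int) :
    PySem.Set.inter s t = s.filter (fun x => t.contains x) := rfl

theorem pv_diff_eq_filter (s t : PySem.Set Int) :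
    PySem.Set.diff s t = s.filter (fun x => !(t.contains x)) := rfl

-- folding set intersection is filtering by membership in every operand
theorem pv_foldl_inter (l : List (List Int)) (s : PySem.Set Int) :
    l.foldl (fun t o => PySem.Set.inter t (PySem.Set.ofList o)) s
      = s.filter (fun x => l.all (fun o => o.contains x)) := by
  induction l generalizing s with
  | nil => simp
  | cons hd tl ih =>
    rw [List.foldl_cons, ih, pv_inter_eq_filter, List.filter_filter]
    refine List.filter_congr (fun x _ => ?_)
    have hm : (PySem.Set.ofList hd).contains x = hd.contains x := by
      simp [PySem.Set.mem_ofList]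
    simp only [List.all_cons, hm]
    rw [Bool.and_comm]

-- folding set difference is filtering by non-membership in every operand
theorem pv_foldl_diff (l : List (List Int)) (s : PySem.Set Int) :
    l.foldl (fun t o => PySem.Set.diff t (PySem.Set.ofList o)) s
      = s.filter (fun x => l.all (fun o => !(o.contains x))) := by
  induction l generalizing s with
  | nil => simp
  | cons hd tl ih =>
    rw [List.foldl_cons, ih, pv_diff_eq_filter, List.filter_filter]
    refine List.filter_congr (fun x _ => ?_)
    have hm : (PySem.Set.ofList hd).contains x = hd.contains x := by
      simp [PySem.Set.mem_ofList]
    simp only [List.all_cons, hm]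
    rw [Bool.and_comm]

-- the keep-test of B's loop, as one predicate (proof-side only)
def pvB_keep (row pts : List Int) (opt : List Int) : Bool := !pvB_cross row opt && !pvB_miss pts opt

-- B's single loop: kept list and the coverage counter, separately
theorem pv_B_fold (row pts : List Int) (l : List (List Int))
    (s : List (List Int) × PySem.Dict Int Int) :
    l.foldl
      (fun (s : List (List Int) × PySem.Dict Int Int) opt =>
        if pvB_cross row opt then s
        else if pvB_miss pts opt then s
        else (s.1 ++ [opt], pvB_bump s.2 opt))
      s
    = (s.1 ++ l.filter (pvB_keep row pts), (l.filter (pvB_keep row pts)).foldl pvB_bump s.2) := by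
  induction l generalizing s with
  | nil => simp
  | cons hd tl ih =>
    rw [List.foldl_cons]
    by_cases h1 : pvB_cross row hd = true
    · rw [if_pos h1, ih]; simp [pvB_keep, h1]
    · rw [if_neg h1]
      by_cases h2 : pvB_miss pts hd = true
      · rw [if_pos h2, ih]; simp [pvB_keep, h1, h2]
      · rw [if_neg h2, ih]; simp [pvB_keep, h1, h2]

-- the counter's value at v counts the kept options containing v
theorem pv_cnt_getD (l : List (List Int)) (d : PySem.Dict Int Int) (v : Int) :
    (l.foldl pvB_bump d).getD v 0
      = d.getD v 0 + (l.countP (fun o => o.contains v) : Int) := by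
  induction l generalizing d with
  | nil => simp
  | cons hd tl ih =>
    rw [List.foldl_cons, ih]
    show (pvB_bump d hd).getD v 0 + _ = _
    rw [pvB_bump, PySem.Dict.getD_foldl_modify_add_one]
    have hcnt : List.count v (PySem.List.dedup hd) = if v ∈ hd then 1 else 0 := by
      by_cases hm : v ∈ hd
      · rw [if_pos hm]
        exact List.count_eq_one_of_mem (PySem.List.nodup_dedup hd)
          (by simpa [PySem.List.mem_dedup] using hm)
      · rw [if_neg hm]
        exact List.count_eq_zero_of_not_mem (by simpa [PySem.List.mem_dedup] using hm)
    rw [List.countP_cons, hcnt]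
    by_cases hm : v ∈ hd
    · simp [hm]
      ring
    · simp [hm]

-- characterizations of B's two skip tests
theorem pv_cross_true (row opt : List Int) :
    pvB_cross row opt = true
      ↔ ∃ c ∈ opt, 0 ≤ c ∧ c < (row.length : Int) ∧ PySem.List.pyGetD row c 0 = 2 := by
  simp [pvB_cross, PySem.List.mem_dedup, and_assoc]

theorem pv_miss_true (pts opt : List Int) :
    pvB_miss pts opt = true ↔ ∃ p ∈ pts, ¬ (p ∈ opt) := by
  simp [pvB_miss, PySem.List.mem_dedup]

-- A's index-set containment test read back on the row
theorem pv_contains_idx (row : List Int) (t x : Int) :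
    ((PySem.Set.ofList ((PySem.List.enumerate row 0).filterMap (fun iv => if iv.2 == t then some iv.1 else none))).contains x = true)
      ↔ (0 ≤ x ∧ x < (row.length : Int) ∧ PySem.List.pyGetD row x 0 = t) := by
  rw [PySem.Set.contains_iff, PySem.Set.mem_ofList, pv_mem_idx]

-- A's cross test on an option = B's (negated) cross test
theorem pv_cross_part (row opt : List Int) :
    (PySem.Set.inter (PySem.Set.ofList opt)
        (PySem.Set.ofList ((PySem.List.enumerate row 0).filterMap (fun iv => if iv.2 == 2 then some iv.1 else none)))).isEmpty
      = !pvB_cross row opt := by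
  rw [Bool.eq_iff_iff, Bool.not_eq_true', Bool.eq_false_iff, Ne, pv_cross_true,
    pv_inter_eq_filter, List.isEmpty_iff, List.filter_eq_nil_iff]
  constructor
  · rintro h ⟨c, hc, h0, h1, hv⟩
    exact h c ((PySem.Set.mem_ofList _ _).mpr hc) ((pv_contains_idx row 2 c).mpr ⟨h0, h1, hv⟩)
  · intro h x hx hcon
    obtain ⟨h0, h1, hv⟩ := (pv_contains_idx row 2 x).mp hcon
    exact h ⟨x, (PySem.Set.mem_ofList _ _).mp hx, h0, h1, hv⟩

-- A's subset test on an option = B's (negated) missed-point test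
theorem pv_miss_part (row opt : List Int) :
    PySem.Set.issubset
        (PySem.Set.ofList ((PySem.List.enumerate row 0).filterMap (fun iv => if iv.2 == 1 then some iv.1 else none)))
        (PySem.Set.ofList opt)
      = !pvB_miss ((PySem.List.enumerate row 0).filterMap (fun iv => if iv.2 == 1 then some iv.1 else none)) opt := by
  rw [Bool.eq_iff_iff, Bool.not_eq_true', Bool.eq_false_iff, Ne, pv_miss_true,
    PySem.Set.issubset_iff]
  constructor
  · rintro h ⟨p, hp, hnp⟩
    exact hnp ((PySem.Set.mem_ofList _ _).mp (h p ((PySem.Set.mem_ofList _ _).mpr hp)))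
  · intro h x hx
    rw [PySem.Set.mem_ofList]
    by_contra hnm
    exact h ⟨x, (PySem.Set.mem_ofList _ _).mp hx, hnm⟩

-- the complete keep-tests agree: A's set algebra = B's direct row lookups
theorem pv_predA_eq (row opt : List Int) :
    ((PySem.Set.inter (PySem.Set.ofList opt)
        (PySem.Set.ofList ((PySem.List.enumerate row 0).filterMap (fun iv => if iv.2 == 2 then some iv.1 else none)))).isEmpty &&
      PySem.Set.issubset
        (PySem.Set.ofList ((PySem.List.enumerate row 0).filterMap (fun iv => if iv.2 == 1 then some iv.1 else none)))
        (PySem.Set.ofList opt))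
    = pvB_keep row ((PySem.List.enumerate row 0).filterMap (fun iv => if iv.2 == 1 then some iv.1 else none)) opt := by
  rw [pvB_keep, pv_cross_part, pv_miss_part]

-- ===== VERDICT (by name: the statement is the Claim_ definition above) =====
theorem solve_row_spec : Claim_equal_solve_row := by
  intro row options _
  unfold Spec_solve_row solve_row solve_row_alt
  simp only [pv_points_crosses, pv_options_fold, PySem.List.map_snd_enumerate,
    PySem.Set.update_nil_left, PySem.Set.empty, pv_B_fold, pv_foldl_inter, pv_foldl_diff,
    List.nil_append]
  have hkept : options.filter (fun opt =>
      (PySem.Set.inter (PySem.Set.ofList opt)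
          (PySem.Set.ofList ((PySem.List.enumerate row 0).filterMap (fun iv => if iv.2 == 2 then some iv.1 else none)))).isEmpty &&
        PySem.Set.issubset
          (PySem.Set.ofList ((PySem.List.enumerate row 0).filterMap (fun iv => if iv.2 == 1 then some iv.1 else none)))
          (PySem.Set.ofList opt))
      = options.filter (pvB_keep row
          ((PySem.List.enumerate row 0).filterMap (fun iv => if iv.2 == 1 then some iv.1 else none))) :=
    List.filter_congr (fun o _ => pv_predA_eq row o)
  rw [hkept]
  have hnr : (PySem.List.pyRange 0 (row.length : Int) 1).Nodup :=
    PySem.List.nodup_pyRange_one 0 _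
  rw [PySem.Set.ofList_eq_self_of_nodup _ hnr, pv_diff_eq_filter, pv_diff_eq_filter,
    List.filter_filter, List.filter_filter,
    PySem.Set.ofList_eq_self_of_nodup _ (List.Nodup.filter _ hnr),
    PySem.Set.ofList_eq_self_of_nodup _ (List.Nodup.filter _ hnr)]
  have hcell : ∀ (t x : Int), 0 ≤ x → x < (row.length : Int) →
      ((PySem.Set.ofList ((PySem.List.enumerate row 0).filterMap
          (fun iv => if iv.2 == t then some iv.1 else none))).contains x)
        = (PySem.List.pyGetD row x 0 == t) := by
    intro t x h0 h1
    rw [Bool.eq_iff_iff, pv_contains_idx, beq_iff_eq]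
    exact ⟨fun h => h.2.2, fun hv => ⟨h0, h1, hv⟩⟩
  have hcnt : ∀ x : Int,
      ((options.filter (pvB_keep row ((PySem.List.enumerate row 0).filterMap (fun iv => if iv.2 == 1 then some iv.1 else none)))).foldl pvB_bump PySem.Dict.empty).getD x 0
        = ((options.filter (pvB_keep row ((PySem.List.enumerate row 0).filterMap (fun iv => if iv.2 == 1 then some iv.1 else none)))).countP (fun o => o.contains x) : Int) := by
    intro x
    rw [pv_cnt_getD]
    simp
  congr 1
  · refine List.filter_congr (fun x hx => ?_)
    have hb := (PySem.List.mem_pyRange_one).mp hx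
    rw [hcell 1 x hb.1 hb.2, hcnt, Bool.and_comm]
    congr 1
    rw [Bool.eq_iff_iff, beq_iff_eq, Int.natCast_inj, List.countP_eq_length, List.all_eq_true]
  · refine List.filter_congr (fun x hx => ?_)
    have hb := (PySem.List.mem_pyRange_one).mp hx
    rw [hcell 2 x hb.1 hb.2, hcnt, Bool.and_comm]
    congr 1
    rw [Bool.eq_iff_iff, beq_iff_eq, Int.natCast_eq_zero, List.countP_eq_zero, List.all_eq_true]
    exact ⟨fun h o ho => by simpa using h o ho, fun h o ho => by simpa using h o ho⟩
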